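-- pv_equiv track=rewrite | github.com/yusufmedhat/process-mining-prototype | venv/Lib/site-packages/pm4py/util/variants_util.py | __aggregate_variant
-- ===== SOURCE A (Python) =====
-- from typing import Union, Dict, Collection, List
--
-- def __aggregate_variant(
--     variant: Collection[str], max_repetitions: int = 1
-- ) -> Collection[str]:
--     """
--     Internal method
--     """
--     aggregated_variant = []
--     act = None
--     count = 0
--     i = 0
--     while i < len(variant):
--         count = count + 1
--         if variant[i] != act:
--             # reset the counter when a new activity is encountered
--             act = variant[i]
--             count = 1
--         if count <= max_repetitions:
--             aggregated_variant.append(act)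
--         i = i + 1
--     return tuple(aggregated_variant)
-- ===== SOURCE B (Python) =====
-- def __aggregate_variant(variant, max_repetitions=1):
--     """Stateless per-index filter: keep variant[i] unless the max_repetitions
--     elements immediately before it all equal variant[i] (no counter, no runs)."""
--     v = list(variant)
--     return tuple(
--         v[i]
--         for i in range(len(v))
--         if max_repetitions > 0
--         and (i < max_repetitions
--              or any(v[j] != v[i] for j in range(i - max_repetitions, i)))
--     )
-- ===== Notes on version B (the rewrite author's own statement) =====
-- stated objective: alternative
-- what changed: Replaces A's stateful single pass with a running counter and reset by a stateless per-index filter: position i is kept iff max_repetitions > 0 and the max_repetitions elements immediately before i do not all equal v[i] (checked by a backward window scan).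
import Mathlib
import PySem

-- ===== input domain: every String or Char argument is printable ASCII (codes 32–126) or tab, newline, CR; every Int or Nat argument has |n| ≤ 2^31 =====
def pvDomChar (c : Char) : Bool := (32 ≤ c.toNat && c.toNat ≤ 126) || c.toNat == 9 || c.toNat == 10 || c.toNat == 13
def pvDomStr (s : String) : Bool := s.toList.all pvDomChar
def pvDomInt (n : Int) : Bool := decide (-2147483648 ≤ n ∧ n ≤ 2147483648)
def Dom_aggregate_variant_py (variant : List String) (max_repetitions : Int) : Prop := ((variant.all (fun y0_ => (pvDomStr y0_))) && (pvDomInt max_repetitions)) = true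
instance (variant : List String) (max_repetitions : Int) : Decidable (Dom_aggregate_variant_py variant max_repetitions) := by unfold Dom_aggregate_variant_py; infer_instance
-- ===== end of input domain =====

-- B replaces A's stateful running-counter pass by a stateless per-index window filter
-- (keep i iff the max_repetitions elements right before i do not all equal v[i]);
-- objective: alternative (same result, different algorithm, not faster).

-- ===== PORT A =====
-- A's while loop walks the elements in order with state (aggregated_variant, act, count):
-- count += 1; reset act/count on a new activity; append act when count <= max_repetitions.
-- act : Option String because Python starts with act = None.
def aggregate_variant_py (variant : List String) (max_repetitions : Int) : List String :=
  (variant.foldl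
    (fun (st : List String × Option String × Int) v =>
      let count := st.2.2 + 1
      let (act, count) :=
        if some v ≠ st.2.1 then (some v, (1 : Int)) else (st.2.1, count)
      let acc := if count ≤ max_repetitions then st.1 ++ [act.getD ""] else st.1
      (acc, act, count))
    ([], none, 0)).1

-- ===== PORT B =====
-- the generator's filter condition: max_repetitions > 0 and (i < max_repetitions or
-- any(v[j] != v[i] for j in range(i - max_repetitions, i))).  When the `any` branch is
-- reached, m.toNat ≤ i, so range(i-m, i) is List.range' (i - m.toNat) m.toNat.
def pvKeep (v : List String) (m : Int) (i : Nat) : Bool :=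
  if 0 < m then
    if (i : Int) < m then true
    else (List.range' (i - m.toNat) m.toNat).any (fun j => v.getD j "" != v.getD i "")
  else false

-- tuple(v[i] for i in range(len(v)) if <pvKeep>)
def aggregate_variant_py_alt (variant : List String) (max_repetitions : Int) : List String :=
  ((List.range variant.length).filter (pvKeep variant max_repetitions)).map
    (fun i => variant.getD i "")

-- ===== PRECONDITION & SPEC =====
def Spec_aggregate_variant_py (variant : List String) (max_repetitions : Int) (out : List String) : Prop := out = aggregate_variant_py_alt variant max_repetitions
instance (variant : List String) (max_repetitions : Int) (out : List String) : Decidable (Spec_aggregate_variant_py variant max_repetitions out) := by unfold Spec_aggregate_variant_py; infer_instance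

-- ===== CLAIM (what is proved, stated in full; the proofs are below) =====
def Claim_equal_aggregate_variant_py : Prop := ∀ (variant : List String) (max_repetitions : Int), Dom_aggregate_variant_py variant max_repetitions → Spec_aggregate_variant_py variant max_repetitions (aggregate_variant_py variant max_repetitions)

-- ===== LEMMAS AND PROOFS =====

-- A's loop body, in emitted-suffix form (structural recursion on the remaining input).
def pvAggA (mr : Int) : Option String → Int → List String → List String
  | _, _, [] => []
  | act, count, x :: xs =>
    if some x ≠ act then
      (if (1 : Int) ≤ mr then [x] else []) ++ pvAggA mr (some x) 1 xs
    else
      (if count + 1 ≤ mr then [x] else []) ++ pvAggA mr act (count + 1) xs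

theorem pvFoldl_eq_aggA (mr : Int) :
    ∀ (l : List String) (acc : List String) (act : Option String) (c : Int),
      (l.foldl (fun (st : List String × Option String × Int) v =>
        let count := st.2.2 + 1
        let (act, count) :=
          if some v ≠ st.2.1 then (some v, (1 : Int)) else (st.2.1, count)
        let acc := if count ≤ mr then st.1 ++ [act.getD ""] else st.1
        (acc, act, count)) (acc, act, c)).1 = acc ++ pvAggA mr act c l := by
  intro l
  induction l with
  | nil => intro acc act c; simp [pvAggA]
  | cons x xs ih =>
    intro acc act c
    by_cases h : some x ≠ act
    · simp only [List.foldl_cons, if_pos h]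
      rw [ih]
      have hA : pvAggA mr act c (x :: xs) =
          (if (1 : Int) ≤ mr then [x] else []) ++ pvAggA mr (some x) 1 xs := by
        simp only [pvAggA, if_pos h]
      rw [hA]
      by_cases hm : (1 : Int) ≤ mr <;> simp [hm, List.append_assoc]
    · have hact : act = some x := by
        by_contra hne
        exact h (fun he => hne he.symm)
      simp only [List.foldl_cons, if_neg h]
      rw [ih]
      have hA : pvAggA mr act c (x :: xs) =
          (if c + 1 ≤ mr then [x] else []) ++ pvAggA mr act (c + 1) xs := by
        simp only [pvAggA, if_neg h]
      rw [hA]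
      by_cases hm : c + 1 ≤ mr <;> simp [hact, hm, List.append_assoc]

theorem pvPortA_eq_aggA (variant : List String) (mr : Int) :
    aggregate_variant_py variant mr = pvAggA mr none 0 variant := by
  unfold aggregate_variant_py
  rw [pvFoldl_eq_aggA]
  simp

-- the trailing-run length of the processed prefix, prefix given in REVERSED form:
-- 0 for the empty prefix, else 1 + (how many further leading elements equal the head).
def pvCval : List String → Int
  | [] => 0
  | a :: r => 1 + ((r.takeWhile (· == a)).length : Int)

theorem pvCval_cons (a : String) (r : List String) :
    pvCval (a :: r) = 1 + ((r.takeWhile (· == a)).length : Int) := rfl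

theorem pvTakeWhile_lt_iff (p : String → Bool) :
    ∀ (r : List String) (n : Nat), n ≤ r.length →
      ((r.takeWhile p).length < n ↔ ∃ k, k < n ∧ p (r.getD k "") = false) := by
  intro r
  induction r with
  | nil =>
    intro n hn
    have : n = 0 := by simpa using hn
    subst this
    simp
  | cons a rs ih =>
    intro n hn
    cases n with
    | zero => simp
    | succ n' =>
      by_cases hp : p a
      · rw [List.takeWhile_cons_of_pos hp]
        simp only [List.length_cons, Nat.succ_lt_succ_iff]
        rw [ih n' (by simpa using hn)]
        constructor
        · rintro ⟨k, hk, hf⟩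
          exact ⟨k + 1, by omega, by simpa using hf⟩
        · rintro ⟨k, hk, hf⟩
          cases k with
          | zero => simp [hp] at hf
          | succ k' => exact ⟨k', by omega, by simpa using hf⟩
      · rw [List.takeWhile_cons_of_neg hp]
        simp only [List.length_nil]
        constructor
        · intro _
          exact ⟨0, by omega, by simpa using hp⟩
        · intro _; omega

theorem pvKeep_head (m : Int) (r l : List String) (x : String) :
    pvKeep (r.reverse ++ x :: l) m r.length = decide (pvCval (x :: r) ≤ m) := by
  have hx : (r.reverse ++ x :: l).getD r.length "" = x := by
    rw [List.getD_eq_getElem?_getD, List.getElem?_append_right (by simp)]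
    simp
  have htle : (r.takeWhile (· == x)).length ≤ r.length := (List.takeWhile_sublist _).length_le
  rw [pvCval_cons]
  unfold pvKeep
  by_cases hm : 0 < m
  · rw [if_pos hm]
    by_cases hi : (r.length : Int) < m
    · rw [if_pos hi]
      have : 1 + ((r.takeWhile (· == x)).length : Int) ≤ m := by
        have : ((r.takeWhile (· == x)).length : Int) ≤ (r.length : Int) := by
          exact_mod_cast htle
        omega
      simp [this]
    · rw [if_neg hi]
      have hmr : m.toNat ≤ r.length := by omega
      have hmc : (m.toNat : Int) = m := by omega
      have hidx : ∀ j, j < r.length →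
          (r.reverse ++ x :: l).getD j "" = r.getD (r.length - 1 - j) "" := by
        intro j hj
        rw [List.getD_eq_getElem?_getD, List.getElem?_append_left (by simpa using hj),
          List.getElem?_reverse (by simpa using hj), ← List.getD_eq_getElem?_getD]
      have hiff : ((List.range' (r.length - m.toNat) m.toNat).any
          (fun j => (r.reverse ++ x :: l).getD j "" != (r.reverse ++ x :: l).getD r.length "")) = true
          ↔ (r.takeWhile (· == x)).length < m.toNat := by
        rw [List.any_eq_true, pvTakeWhile_lt_iff (· == x) r m.toNat hmr]
        constructor
        · rintro ⟨j, hjmem, hne⟩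
          rw [List.mem_range'_1] at hjmem
          refine ⟨r.length - 1 - j, by omega, ?_⟩
          rw [← hidx j (by omega)]
          rw [hx] at hne
          simpa using hne
        · rintro ⟨k, hk, hf⟩
          refine ⟨r.length - 1 - k, by rw [List.mem_range'_1]; omega, ?_⟩
          rw [hx, hidx _ (by omega)]
          have : r.length - 1 - (r.length - 1 - k) = k := by omega
          rw [this]
          simpa using hf
      by_cases ht : (r.takeWhile (· == x)).length < m.toNat
      · rw [(hiff.mpr ht : _ = true)]
        have : 1 + ((r.takeWhile (· == x)).length : Int) ≤ m := by omega
        simp [this]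
      · have hfalse : ((List.range' (r.length - m.toNat) m.toNat).any
            (fun j => (r.reverse ++ x :: l).getD j "" != (r.reverse ++ x :: l).getD r.length "")) = false := by
          cases hEq : ((List.range' (r.length - m.toNat) m.toNat).any
            (fun j => (r.reverse ++ x :: l).getD j "" != (r.reverse ++ x :: l).getD r.length "")) with
          | false => rfl
          | true => exact absurd (hiff.mp hEq) ht
        rw [hfalse]
        have : ¬ (1 + ((r.takeWhile (· == x)).length : Int) ≤ m) := by omega
        simp [this]
  · rw [if_neg hm]
    have : ¬ (1 + ((r.takeWhile (· == x)).length : Int) ≤ m) := by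
      have : (0 : Int) ≤ ((r.takeWhile (· == x)).length : Int) := by positivity
      omega
    simp [this]

theorem pvMain (m : Int) :
    ∀ (l r : List String),
      pvAggA m r.head? (pvCval r) l =
        ((List.range' r.length l.length).filter (pvKeep (r.reverse ++ l) m)).map
          (fun i => (r.reverse ++ l).getD i "") := by
  intro l
  induction l with
  | nil => intro r; simp [pvAggA]
  | cons x xs ih =>
    intro r
    have hx : (r.reverse ++ x :: xs).getD r.length "" = x := by
      rw [List.getD_eq_getElem?_getD, List.getElem?_append_right (by simp)]
      simp
    have hkeep := pvKeep_head m r xs x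
    have hv : (x :: r).reverse ++ xs = r.reverse ++ x :: xs := by simp
    have hrec := ih (x :: r)
    rw [hv] at hrec
    have hstep : pvAggA m r.head? (pvCval r) (x :: xs) =
        (if pvCval (x :: r) ≤ m then [x] else []) ++
          pvAggA m (x :: r).head? (pvCval (x :: r)) xs := by
      by_cases h : some x ≠ r.head?
      · have hc : pvCval (x :: r) = 1 := by
          rw [pvCval_cons]
          have hnil : r.takeWhile (· == x) = [] := by
            cases r with
            | nil => simp
            | cons a rs =>
              have hax : ¬ (a == x) = true := by
                intro hax
                exact h (by simp [List.head?_cons, eq_of_beq hax])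
              simp [hax]
          rw [hnil]
          simp
        rw [hc]
        simp only [pvAggA, if_pos h, List.head?_cons]
      · push Not at h
        obtain ⟨a, rs, hr⟩ : ∃ a rs, r = a :: rs := by
          cases r with
          | nil => simp at h
          | cons a rs => exact ⟨a, rs, rfl⟩
        have hax : a = x := by
          rw [hr] at h; simpa using h.symm
        subst hax hr
        have hc : pvCval (a :: a :: rs) = pvCval (a :: rs) + 1 := by
          rw [pvCval_cons, pvCval_cons]
          simp
          ring
        rw [hc]
        simp only [pvAggA, List.head?_cons]
        rw [if_neg (by simp)]
    rw [hstep, hrec]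
    have hrange : List.range' r.length (x :: xs).length =
        r.length :: List.range' (r.length + 1) xs.length := by
      simp [List.range'_succ]
    rw [hrange, List.filter_cons]
    by_cases hc : pvCval (x :: r) ≤ m
    · rw [if_pos hc]
      have : pvKeep (r.reverse ++ x :: xs) m r.length = true := by
        rw [hkeep]; simpa using hc
      simp only [this, if_pos, List.map_cons, hx]
      simp [List.length_cons]
    · rw [if_neg hc]
      have : pvKeep (r.reverse ++ x :: xs) m r.length = false := by
        rw [hkeep]; simpa using hc
      simp [this, List.length_cons]

-- ===== VERDICT (by name: the statement is the Claim_ definition above) =====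
theorem aggregate_variant_py_spec : Claim_equal_aggregate_variant_py := by
  intro variant mr _
  unfold Spec_aggregate_variant_py aggregate_variant_py_alt
  rw [pvPortA_eq_aggA]
  have := pvMain mr variant []
  simpa [List.range_eq_range', pvCval] using this
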